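-- pv_equiv track=rewrite | github.com/RamananVr/Leetcodepython | arrays/2731_movement_of_robots.py | sum_of_distances_after_queries
-- ===== SOURCE A (Python) =====
-- def sum_of_distances_after_queries(nums: list[int], s: str, d: int) -> int:
--     """
--     Calculate sum of distances between all pairs of robots after d seconds.
--     Key insight: Collisions don't affect the final sorted order of positions.
--
--     Args:
--         nums: Initial positions of robots
--         s: Direction string ('L' for left, 'R' for right)
--         d: Number of seconds
--
--     Returns:
--         int: Sum of distances between all pairs modulo 10^9 + 7
--
--     Time Complexity: O(n log n) - due to sorting
--     Space Complexity: O(n) - for storing final positions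
--     """
--     MOD = 10**9 + 7
--     n = len(nums)
--
--     # Calculate final positions after d seconds (ignoring collisions)
--     final_positions = []
--     for i in range(n):
--         if s[i] == 'L':
--             final_positions.append(nums[i] - d)
--         else:
--             final_positions.append(nums[i] + d)
--
--     # Sort final positions
--     final_positions.sort()
--
--     # Calculate sum of distances between all pairs
--     total_distance = 0
--     for i in range(n):
--         for j in range(i + 1, n):
--             total_distance = (total_distance + final_positions[j] - final_positions[i]) % MOD
--
--     return total_distance
-- ===== SOURCE B (Python) =====
-- def sum_of_distances_after_queries(nums: list[int], s: str, d: int) -> int: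
--     MOD = 10**9 + 7
--     pos = sorted(x - d if c == 'L' else x + d for x, c in zip(nums, s))
--     total = 0
--     prefix = 0
--     for i, p in enumerate(pos):
--         total += p * i - prefix
--         prefix += p
--     return total % MOD
-- ===== Notes on version B (the rewrite author's own statement) =====
-- stated objective: faster
-- what changed: Replaced the O(n^2) double loop over all pairs (with a modular add per pair) by a single prefix-sum pass over the sorted positions (each position contributes pos[i]*i - prefix), taking the modulus once at the end.
import Mathlib
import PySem

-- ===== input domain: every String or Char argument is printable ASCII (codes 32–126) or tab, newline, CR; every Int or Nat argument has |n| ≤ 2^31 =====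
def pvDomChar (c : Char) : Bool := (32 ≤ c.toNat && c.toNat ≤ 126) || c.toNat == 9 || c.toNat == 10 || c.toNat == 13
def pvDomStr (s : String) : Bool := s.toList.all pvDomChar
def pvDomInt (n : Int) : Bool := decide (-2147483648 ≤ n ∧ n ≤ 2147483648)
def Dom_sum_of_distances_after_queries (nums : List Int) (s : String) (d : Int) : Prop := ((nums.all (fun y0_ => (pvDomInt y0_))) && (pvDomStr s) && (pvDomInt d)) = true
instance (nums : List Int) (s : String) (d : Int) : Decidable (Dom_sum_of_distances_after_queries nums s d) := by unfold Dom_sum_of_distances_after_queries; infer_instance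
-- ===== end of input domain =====

-- B replaces A's O(n^2) pairwise double loop (one modular add per pair) by a single
-- prefix-sum pass over the sorted positions, taking the modulus once at the end (faster).

-- ===== PORT A =====
-- Indices i, j below are Nat (all Python indices here satisfy 0 ≤ i < n); under Pre_ every
-- access s[i] / nums[i] / final_positions[i] is in range, so getD is exact for Python indexing.
def sum_of_distances_after_queries (nums : List Int) (s : String) (d : Int) : Int :=
  let MOD : Int := 1000000007
  let n := nums.length
  -- for i in range(n): final_positions.append(nums[i] - d if s[i] == 'L' else nums[i] + d)
  let finalPositions : List Int := (List.range n).foldl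
    (fun acc i => if s.toList.getD i ' ' = 'L' then acc ++ [nums.getD i 0 - d]
                  else acc ++ [nums.getD i 0 + d]) []
  -- final_positions.sort()
  let q := PySem.List.sorted finalPositions (fun x => x) false
  -- for i in range(n): for j in range(i+1, n): total = (total + fp[j] - fp[i]) % MOD
  (List.range n).foldl
    (fun t i => (List.range' (i+1) (n - (i+1))).foldl
      (fun t' j => PySem.Int.mod (t' + q.getD j 0 - q.getD i 0) MOD) t) 0

-- ===== PORT B =====
def sum_of_distances_after_queries_alt (nums : List Int) (s : String) (d : Int) : Int :=
  let MOD : Int := 1000000007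
  -- pos = sorted(x - d if c == 'L' else x + d for x, c in zip(nums, s))
  let pos := PySem.List.sorted
    ((nums.zip s.toList).map (fun xc => if xc.2 = 'L' then xc.1 - d else xc.1 + d))
    (fun x => x) false
  -- for i, p in enumerate(pos): total += p*i - prefix; prefix += p   (state = (total, prefix, i))
  let r := pos.foldl (fun st p => (st.1 + p * st.2.2 - st.2.1, st.2.1 + p, st.2.2 + 1))
    ((0 : Int), (0 : Int), (0 : Int))
  PySem.Int.mod r.1 MOD

-- ===== PRECONDITION & SPEC =====
-- A evaluates s[i] for every i < len(nums) and raises IndexError when s is shorter than nums;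
-- exactly those inputs are excluded.
def Pre_sum_of_distances_after_queries (nums : List Int) (s : String) (d : Int) : Prop :=
  nums.length ≤ s.toList.length
instance (nums : List Int) (s : String) (d : Int) : Decidable (Pre_sum_of_distances_after_queries nums s d) := by unfold Pre_sum_of_distances_after_queries; infer_instance

def pvWitness_sum_of_distances_after_queries : List Int × String × Int := ([1, -2], "RL", 3)

def Spec_sum_of_distances_after_queries (nums : List Int) (s : String) (d : Int) (out : Int) : Prop := out = sum_of_distances_after_queries_alt nums s d
instance (nums : List Int) (s : String) (d : Int) (out : Int) : Decidable (Spec_sum_of_distances_after_queries nums s d out) := by unfold Spec_sum_of_distances_after_queries; infer_instance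

-- ===== CLAIM (what is proved, stated in full; the proofs are below) =====
def Claim_equal_sum_of_distances_after_queries : Prop := ∀ (nums : List Int) (s : String) (d : Int), Dom_sum_of_distances_after_queries nums s d → Pre_sum_of_distances_after_queries nums s d → Spec_sum_of_distances_after_queries nums s d (sum_of_distances_after_queries nums s d)

-- ===== LEMMAS AND PROOFS =====

-- S l = sum over all index pairs i < j of l[j] - l[i], by head recursion.
def pvS : List Int → Int
  | [] => 0
  | x :: xs => (xs.sum - x * xs.length) + pvS xs

-- A's nested loop as a recursion on the values of the (dropped) list.
def pvARec : List Int → Int → Int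
  | [], t => t
  | x :: xs, t => pvARec xs (xs.foldl (fun t' y => PySem.Int.mod (t' + y - x) 1000000007) t)

-- B's loop body as a recursion on the list.
def pvT : List Int → Int → Int → Int
  | [], _, _ => 0
  | x :: xs, pf, i => (x * i - pf) + pvT xs (pf + x) (i + 1)

lemma pvT_eq (l : List Int) : ∀ pf i, pvT l pf i = pvS l + l.sum * i - pf * l.length := by
  induction l with
  | nil => intro pf i; simp [pvT, pvS]
  | cons x xs ih =>
      intro pf i
      simp only [pvT, pvS, ih, List.sum_cons, List.length_cons]
      push_cast
      ring

lemma pvB_fold (l : List Int) : ∀ t pf i,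
    (l.foldl (fun st p => (st.1 + p * st.2.2 - st.2.1, st.2.1 + p, st.2.2 + 1))
      ((t : Int), (pf : Int), (i : Int))).1 = t + pvT l pf i := by
  induction l with
  | nil => intro t pf i; simp [pvT]
  | cons x xs ih =>
      intro t pf i
      simp only [List.foldl_cons, pvT, ih]
      ring

lemma pv_fold_range'_getD (q : List Int) (f : Int → Int → Int) :
    ∀ (m a : Nat) (t : Int), a + m = q.length →
    (List.range' a m).foldl (fun t' j => f t' (q.getD j 0)) t = (q.drop a).foldl f t := by
  intro m
  induction m with
  | zero =>
      intro a t h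
      simp [List.drop_of_length_le (by omega : q.length ≤ a)]
  | succ m ih =>
      intro a t h
      have ha : a < q.length := by omega
      rw [List.range'_succ, List.foldl_cons,
        ← List.getElem_cons_drop (as := q) (i := a) ha, List.foldl_cons,
        List.getD_eq_getElem q 0 ha, ih (a+1) _ (by omega)]

lemma pv_mod_fold (x : Int) (xs : List Int) : ∀ t : Int, t % 1000000007 = t →
    xs.foldl (fun t' y => PySem.Int.mod (t' + y - x) 1000000007) t
      = (t + (xs.sum - x * xs.length)) % 1000000007 := by
  induction xs with
  | nil => intro t ht; simpa using ht.symm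
  | cons y ys ih =>
      intro t ht
      rw [List.foldl_cons, PySem.Int.mod_eq_emod_of_pos (b := 1000000007) (by omega),
        ih _ (Int.emod_emod_of_dvd _ dvd_rfl)]
      have h1 : ((t + y - x) % 1000000007 + (ys.sum - x * ys.length)) % 1000000007
          = (t + y - x + (ys.sum - x * ys.length)) % 1000000007 := by omega
      rw [h1]
      congr 1
      simp only [List.sum_cons, List.length_cons]
      push_cast
      ring

lemma pvARec_eq (q : List Int) : ∀ t : Int, t % 1000000007 = t →
    pvARec q t = (t + pvS q) % 1000000007 := by
  induction q with
  | nil => intro t ht; simpa [pvARec, pvS] using ht.symm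
  | cons x xs ih =>
      intro t ht
      rw [pvARec, pv_mod_fold x xs t ht, ih _ (Int.emod_emod_of_dvd _ dvd_rfl), pvS]
      omega

lemma pv_outer (q : List Int) (n : Nat) (hn : q.length = n) :
    ∀ (m a : Nat) (t : Int), a + m = n →
    (List.range' a m).foldl
      (fun t' i => (List.range' (i+1) (n - (i+1))).foldl
        (fun t'' j => PySem.Int.mod (t'' + q.getD j 0 - q.getD i 0) 1000000007) t') t
      = pvARec (q.drop a) t := by
  intro m
  induction m with
  | zero =>
      intro a t h
      simp [List.drop_of_length_le (by omega : q.length ≤ a), pvARec]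
  | succ m ih =>
      intro a t h
      have ha : a < q.length := by omega
      rw [List.range'_succ, List.foldl_cons]
      have hinner : (List.range' (a+1) (n - (a+1))).foldl
          (fun t'' j => PySem.Int.mod (t'' + q.getD j 0 - q.getD a 0) 1000000007) t
          = (q.drop (a+1)).foldl (fun t'' y => PySem.Int.mod (t'' + y - q.getD a 0) 1000000007) t :=
        pv_fold_range'_getD q (fun t'' y => PySem.Int.mod (t'' + y - q.getD a 0) 1000000007)
          (n - (a+1)) (a+1) t (by omega)
      rw [hinner, ih (a+1) _ (by omega)]
      conv_rhs => rw [← List.getElem_cons_drop (as := q) (i := a) ha]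
      rw [pvARec, List.getD_eq_getElem q 0 ha]

-- The two pre-sort position lists agree under Pre_.
lemma pv_positions_eq (nums : List Int) (s : String) (d : Int)
    (hp : nums.length ≤ s.toList.length) :
    (List.range nums.length).foldl
      (fun acc i => if s.toList.getD i ' ' = 'L' then acc ++ [nums.getD i 0 - d]
                    else acc ++ [nums.getD i 0 + d]) []
    = (nums.zip s.toList).map (fun xc => if xc.2 = 'L' then xc.1 - d else xc.1 + d) := by
  have h1 : ∀ (acc : List Int) (i : Nat),
      (if s.toList.getD i ' ' = 'L' then acc ++ [nums.getD i 0 - d] else acc ++ [nums.getD i 0 + d])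
      = acc ++ [if s.toList.getD i ' ' = 'L' then nums.getD i 0 - d else nums.getD i 0 + d] := by
    intro acc i; split <;> rfl
  rw [PySem.List.foldl_congr_mem _ _ _ _ (fun acc x _ => h1 acc x),
    PySem.List.foldl_append_singleton_eq_map, List.nil_append]
  apply List.ext_getElem
  · simp only [List.length_map, List.length_zip, List.length_range]
    omega
  · intro k hk1 hk2
    simp only [List.getElem_map, List.getElem_range, List.getElem_zip]
    have hkn : k < nums.length := by simpa using hk1
    rw [List.getD_eq_getElem s.toList ' ' (by omega), List.getD_eq_getElem nums 0 hkn]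

lemma pv_main (nums : List Int) (s : String) (d : Int)
    (hp : nums.length ≤ s.toList.length) :
    sum_of_distances_after_queries nums s d = sum_of_distances_after_queries_alt nums s d := by
  unfold sum_of_distances_after_queries sum_of_distances_after_queries_alt
  simp only []
  rw [pv_positions_eq nums s d hp]
  set pos := PySem.List.sorted
    ((nums.zip s.toList).map (fun xc => if xc.2 = 'L' then xc.1 - d else xc.1 + d))
    (fun x => x) false with hpos
  have hlen : pos.length = nums.length := by
    rw [hpos, (PySem.List.sorted_perm _ _ _).length_eq, List.length_map, List.length_zip]
    omega
  rw [List.range_eq_range']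
  rw [pv_outer pos nums.length hlen nums.length 0 0 (by omega), List.drop_zero,
    pvARec_eq pos 0 (by decide), pvB_fold, pvT_eq,
    PySem.Int.mod_eq_emod_of_pos (b := 1000000007) (by omega)]
  congr 1
  ring

-- ===== VERDICT (by name: the statement is the Claim_ definition above) =====
theorem sum_of_distances_after_queries_spec : Claim_equal_sum_of_distances_after_queries := by
  intro nums s d _ hp
  unfold Spec_sum_of_distances_after_queries
  exact pv_main nums s d hp
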